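-- pv_equiv track=rewrite | github.com/GloamingBlue/Leetcode | Double157/2.py | maxSubstrings
-- ===== SOURCE A (Python) =====
-- def maxSubstrings(word: str) -> int:
--     n = len(word)
--     if n < 4:
--         return 0
--     i, j, ans = 0, 1, 0
--
--     while j < n:
--         if j > i + 2 and word[j] in word[i:j-2]:
--             i = j + 1
--             j = i + 1
--             ans += 1
--         else:
--             j = j + 1
--     return ans
-- ===== SOURCE B (Python) =====
-- def maxSubstrings(word: str) -> int:
--     n = len(word)
--     # Pass 1: prev[j] = largest index k <= j-3 with word[k] == word[j], else -1.
--     prev = []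
--     last = {}
--     for j in range(n):
--         if j >= 3:
--             last[word[j - 3]] = j - 3
--         prev.append(last.get(word[j], -1))
--     # Pass 2: greedy count using only integer comparisons.
--     ans = 0
--     i = 0
--     for j in range(n):
--         if prev[j] >= i:
--             ans += 1
--             i = j + 1
--     return ans
-- ===== Notes on version B (the rewrite author's own statement) =====
-- stated objective: alternative
-- what changed: B is a two-stage algorithm: a first pass precomputes prev[j], the latest occurrence of word[j] at distance >= 3 (a last-occurrence dict updated with a 3-step delay), and a second pass does the greedy count with a single integer comparison prev[j] >= i per position; A's sliding window with a per-step slice-and-scan membership test disappears entirely (not measured faster on the generated inputs).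
import Mathlib
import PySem

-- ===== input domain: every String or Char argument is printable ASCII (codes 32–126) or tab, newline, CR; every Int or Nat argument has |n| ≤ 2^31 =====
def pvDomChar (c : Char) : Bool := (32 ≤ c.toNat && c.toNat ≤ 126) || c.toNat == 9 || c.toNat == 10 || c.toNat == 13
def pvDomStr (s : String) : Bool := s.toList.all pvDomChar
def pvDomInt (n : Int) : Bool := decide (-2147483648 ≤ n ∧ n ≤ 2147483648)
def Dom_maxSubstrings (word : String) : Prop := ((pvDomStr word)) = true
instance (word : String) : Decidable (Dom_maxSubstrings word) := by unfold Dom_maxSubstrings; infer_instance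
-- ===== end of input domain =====

-- B is a two-stage algorithm (a precomputed prev-occurrence array, then a greedy scan with one
-- integer comparison per position) replacing A's sliding window with per-step slice membership
-- tests (alternative; not measured faster).

-- ===== PORT A =====
-- A's while loop as fuel recursion (fuel only makes it total: j strictly increases each
-- iteration and the loop runs while j < n, so fuel n is never exhausted).
def maxSubstringsLoopA (cs : List Char) (n : Nat) : Nat → Nat → Nat → Int → Int
  | 0, _, _, ans => ans
  | fuel + 1, i, j, ans =>
    if j < n then
      if decide (j > i + 2) &&
         PySem.Chars.isIn [PySem.List.pyGetD cs (j : Int) ' ']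
           (PySem.List.slice cs (some (i : Int)) (some ((j : Int) - 2))) then
        maxSubstringsLoopA cs n fuel (j + 1) (j + 2) (ans + 1)
      else
        maxSubstringsLoopA cs n fuel i (j + 1) ans
    else ans

def maxSubstrings (word : String) : Int :=
  let cs := word.toList
  let n := cs.length
  if n < 4 then 0
  else maxSubstringsLoopA cs n n 0 1 0

-- ===== PORT B =====
-- first pass body: delayed last-occurrence dict update, then append last.get(word[j], -1)
def buildPrevStep (cs : List Char) (st : PySem.Dict Char Int × List Int) (j : Nat) :
    PySem.Dict Char Int × List Int :=
  let last := if 3 ≤ j then st.1.insert (cs.getD (j - 3) ' ') ((j : Int) - 3) else st.1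
  (last, st.2 ++ [last.getD (cs.getD j ' ') (-1)])

-- second pass body: greedy count, i and ans as the pair state
def countStep (prev : List Int) (st : Int × Int) (j : Nat) : Int × Int :=
  if st.2 ≤ prev.getD j (-1) then (st.1 + 1, (j : Int) + 1) else st

def maxSubstrings_alt (word : String) : Int :=
  let cs := word.toList
  let n := cs.length
  let prev := ((List.range n).foldl (buildPrevStep cs) (PySem.Dict.empty, [])).2
  ((List.range n).foldl (countStep prev) (0, 0)).1

-- ===== PRECONDITION & SPEC =====
def Spec_maxSubstrings (word : String) (out : Int) : Prop := out = maxSubstrings_alt word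
instance (word : String) (out : Int) : Decidable (Spec_maxSubstrings word out) := by unfold Spec_maxSubstrings; infer_instance

-- ===== CLAIM (what is proved, stated in full; the proofs are below) =====
def Claim_equal_maxSubstrings : Prop := ∀ (word : String), Dom_maxSubstrings word → Spec_maxSubstrings word (maxSubstrings word)

-- ===== LEMMAS AND PROOFS =====

-- spec of the first pass: latest k < t with cs[k] = c, else -1
def lastOcc (cs : List Char) (t : Nat) (c : Char) : Int :=
  (List.range t).foldl (fun acc k => if cs.getD k ' ' = c then (k : Int) else acc) (-1)

lemma lastOcc_lt (cs : List Char) (t : Nat) (c : Char) : lastOcc cs t c < (t : Int) := by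
  induction t with
  | zero => simp [lastOcc]
  | succ t ih =>
    unfold lastOcc at ih ⊢
    rw [List.range_succ, List.foldl_append, List.foldl_cons, List.foldl_nil]
    split_ifs with h
    · push_cast; omega
    · push_cast at ih ⊢; omega

lemma le_lastOcc_iff (cs : List Char) (t i : Nat) (c : Char) :
    ((i : Int) ≤ lastOcc cs t c) ↔ ∃ k, i ≤ k ∧ k < t ∧ cs.getD k ' ' = c := by
  induction t with
  | zero =>
    simp only [lastOcc, List.range_zero, List.foldl_nil]
    constructor
    · intro h; exact absurd h (by omega)
    · rintro ⟨k, -, hk, -⟩; omega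
  | succ t ih =>
    unfold lastOcc at ih ⊢
    rw [List.range_succ, List.foldl_append, List.foldl_cons, List.foldl_nil]
    by_cases hc : cs.getD t ' ' = c
    · rw [if_pos hc]
      constructor
      · intro h
        refine ⟨t, by omega, by omega, hc⟩
      · rintro ⟨k, hk1, hk2, -⟩
        have : i ≤ t := by omega
        omega
    · rw [if_neg hc, ih]
      constructor
      · rintro ⟨k, h1, h2, h3⟩; exact ⟨k, h1, by omega, h3⟩
      · rintro ⟨k, h1, h2, h3⟩
        refine ⟨k, h1, ?_, h3⟩
        rcases Nat.lt_succ_iff_lt_or_eq.mp h2 with h | h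
        · exact h
        · subst h; exact absurd h3 hc

-- the first pass computes lastOcc: dict = lastOcc at horizon m-3, list = lastOcc at j-2 per j
lemma prevFold_spec (cs : List Char) (m : Nat) :
    (∀ c, ((List.range m).foldl (buildPrevStep cs) (PySem.Dict.empty, [])).1.getD c (-1)
        = lastOcc cs (m - 3) c) ∧
    ((List.range m).foldl (buildPrevStep cs) (PySem.Dict.empty, [])).2
        = (List.range m).map (fun j => lastOcc cs (j - 2) (cs.getD j ' ')) := by
  induction m with
  | zero =>
    constructor
    · intro c
      simp [lastOcc, PySem.Dict.getD_empty]
    · rfl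
  | succ m ih =>
    obtain ⟨ihd, ihl⟩ := ih
    rw [List.range_succ, List.foldl_append, List.foldl_cons, List.foldl_nil]
    have hdict : ∀ c, (buildPrevStep cs
        ((List.range m).foldl (buildPrevStep cs) (PySem.Dict.empty, [])) m).1.getD c (-1)
        = lastOcc cs (m + 1 - 3) c := by
      intro c
      simp only [buildPrevStep]
      by_cases h3 : 3 ≤ m
      · rw [if_pos h3, PySem.Dict.getD_insert]
        rw [show m + 1 - 3 = (m - 3) + 1 from by omega]
        unfold lastOcc
        rw [List.range_succ, List.foldl_append, List.foldl_cons, List.foldl_nil]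
        by_cases hc : c = cs.getD (m - 3) ' '
        · rw [if_pos hc, if_pos hc.symm]
          omega
        · rw [if_neg hc, if_neg (fun h => hc h.symm)]
          exact ihd c
      · rw [if_neg h3]
        rw [show m + 1 - 3 = m - 3 from by omega]
        exact ihd c
    refine ⟨hdict, ?_⟩
    rw [List.map_append, List.map_cons, List.map_nil, ← ihl]
    have hlast := hdict (cs.getD m ' ')
    simp only [buildPrevStep] at hlast ⊢
    rw [hlast]
    rw [show m + 1 - 3 = m - 2 from by omega]

lemma prev_getD (cs : List Char) (n j : Nat) (hj : j < n) :
    (((List.range n).foldl (buildPrevStep cs) (PySem.Dict.empty, [])).2).getD j (-1)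
      = lastOcc cs (j - 2) (cs.getD j ' ') := by
  rw [(prevFold_spec cs n).2]
  rw [List.getD_eq_getElem _ _ (by simpa using hj)]
  simp

-- membership in A's window slice as an index statement
lemma mem_window (cs : List Char) (i m : Nat) (hm : i + m ≤ cs.length) (c : Char) :
    c ∈ (cs.drop i).take m ↔ ∃ k, i ≤ k ∧ k < i + m ∧ cs.getD k ' ' = c := by
  have hlen : ((cs.drop i).take m).length = m := by simp; omega
  rw [List.mem_iff_getElem]
  constructor
  · rintro ⟨t, ht, rfl⟩
    rw [hlen] at ht
    refine ⟨i + t, by omega, by omega, ?_⟩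
    rw [List.getElem_take, List.getElem_drop, List.getD_eq_getElem _ _ (by omega)]
  · rintro ⟨k, hk1, hk2, hk3⟩
    refine ⟨k - i, by rw [hlen]; omega, ?_⟩
    rw [List.getElem_take, List.getElem_drop, ← hk3,
      List.getD_eq_getElem _ _ (by omega)]
    congr 1
    omega

-- A's branch test equals B's integer comparison
lemma cond_eq (cs : List Char) (i j : Nat) (hj : j < cs.length) :
    (decide (j > i + 2) &&
      PySem.Chars.isIn [PySem.List.pyGetD cs (j : Int) ' ']
        (PySem.List.slice cs (some (i : Int)) (some ((j : Int) - 2))))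
    = decide ((i : Int) ≤ lastOcc cs (j - 2) (cs.getD j ' ')) := by
  by_cases hij : i + 2 < j
  · rw [show ((j : Int) - 2) = (((j - 2 : Nat)) : Int) from by omega,
      PySem.List.slice_natCast, PySem.List.pyGetD_natCast]
    rw [Bool.eq_iff_iff]
    simp only [Bool.and_eq_true, decide_eq_true_eq, PySem.Chars.isIn_iff_infix,
      List.singleton_infix_iff]
    rw [mem_window cs i (j - 2 - i) (by omega), le_lastOcc_iff]
    constructor
    · rintro ⟨-, k, h1, h2, h3⟩
      exact ⟨k, h1, by omega, h3⟩
    · rintro ⟨k, h1, h2, h3⟩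
      exact ⟨by omega, k, h1, by omega, h3⟩
  · rw [decide_eq_false (by omega : ¬ j > i + 2), Bool.false_and]
    rw [eq_comm, decide_eq_false_iff_not, le_lastOcc_iff]
    rintro ⟨k, h1, h2, -⟩
    omega

-- lockstep: A's loop from cursor (i, j) equals B's second pass over the remaining indices
lemma lockstep (cs : List Char) (prev : List Int)
    (hprev : ∀ j, j < cs.length → prev.getD j (-1) = lastOcc cs (j - 2) (cs.getD j ' ')) :
    ∀ fuel i j ans, cs.length ≤ fuel + j →
      maxSubstringsLoopA cs cs.length fuel i j ans
        = ((List.range' j (cs.length - j)).foldl (countStep prev) (ans, (i : Int))).1 := by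
  intro fuel
  induction fuel with
  | zero =>
    intro i j ans hfj
    rw [show cs.length - j = 0 from by omega]
    rfl
  | succ fuel ih =>
    intro i j ans hfj
    rw [maxSubstringsLoopA]
    by_cases hj : j < cs.length
    · rw [if_pos hj, cond_eq cs i j hj]
      rw [show cs.length - j = (cs.length - (j + 1)) + 1 from by omega, List.range'_succ,
        List.foldl_cons]
      have hstep : countStep prev (ans, (i : Int)) j
          = if (i : Int) ≤ lastOcc cs (j - 2) (cs.getD j ' ')
            then (ans + 1, (j : Int) + 1) else (ans, (i : Int)) := by
        unfold countStep
        rw [hprev j hj]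
      by_cases hc : (i : Int) ≤ lastOcc cs (j - 2) (cs.getD j ' ')
      · rw [if_pos (decide_eq_true hc), hstep, if_pos hc]
        rw [ih (j + 1) (j + 2) (ans + 1) (by omega)]
        by_cases hj1 : j + 1 < cs.length
        · rw [show cs.length - (j + 1) = (cs.length - (j + 2)) + 1 from by omega,
            List.range'_succ, List.foldl_cons]
          have hnoop : countStep prev (ans + 1, (j : Int) + 1) (j + 1)
              = (ans + 1, (j : Int) + 1) := by
            have hns : ¬ ((j : Int) + 1 ≤ prev.getD (j + 1) (-1)) := by
              rw [hprev (j + 1) hj1]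
              have hlt := lastOcc_lt cs (j + 1 - 2) (cs.getD (j + 1) ' ')
              omega
            unfold countStep
            rw [if_neg hns]
          rw [hnoop, show (((j + 1) : Nat) : Int) = (j : Int) + 1 from by push_cast; ring]
        · rw [show cs.length - (j + 1) = 0 from by omega,
            show cs.length - (j + 2) = 0 from by omega]
          rfl
      · rw [if_neg (fun h => hc (of_decide_eq_true h)), hstep, if_neg hc]
        exact ih i (j + 1) ans (by omega)
    · rw [if_neg hj, show cs.length - j = 0 from by omega]
      rfl

-- B's second pass is a no-op over indices whose prev entry is -1
lemma count_noop (prev : List Int) (ans i : Int) (hi : 0 ≤ i) :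
    ∀ l : List Nat, (∀ j ∈ l, prev.getD j (-1) = -1) →
      l.foldl (countStep prev) (ans, i) = (ans, i) := by
  intro l
  induction l with
  | nil => intro _; rfl
  | cons a l ih =>
    intro h
    rw [List.foldl_cons]
    have hstep : countStep prev (ans, i) a = (ans, i) := by
      unfold countStep
      rw [h a (List.mem_cons_self ..), if_neg (by omega)]
    rw [hstep]
    exact ih (fun j hj => h j (List.mem_cons_of_mem _ hj))

-- ===== VERDICT (by name: the statement is the Claim_ definition above) =====
theorem maxSubstrings_spec : Claim_equal_maxSubstrings := by
  intro word _
  unfold Spec_maxSubstrings maxSubstrings maxSubstrings_alt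
  show (if word.toList.length < 4 then (0 : Int)
      else maxSubstringsLoopA word.toList word.toList.length word.toList.length 0 1 0)
    = ((List.range word.toList.length).foldl
        (countStep (((List.range word.toList.length).foldl (buildPrevStep word.toList)
          (PySem.Dict.empty, [])).2)) (0, 0)).1
  set prev := ((List.range word.toList.length).foldl (buildPrevStep word.toList)
      (PySem.Dict.empty, ([] : List Int))).2 with hpdef
  have hprev : ∀ j, j < word.toList.length →
      prev.getD j (-1) = lastOcc word.toList (j - 2) (word.toList.getD j ' ') := by
    intro j hj
    rw [hpdef]
    exact prev_getD word.toList word.toList.length j hj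
  by_cases hn : word.toList.length < 4
  · rw [if_pos hn, count_noop prev 0 0 le_rfl (List.range word.toList.length) ?_]
    intro j hj
    rw [List.mem_range] at hj
    rw [hprev j hj, show j - 2 = 0 from by omega]
    simp [lastOcc]
  · rw [if_neg hn,
      lockstep word.toList prev hprev word.toList.length 0 1 0 (by omega)]
    have hrange : List.range word.toList.length
        = 0 :: List.range' 1 (word.toList.length - 1) := by
      rw [List.range_eq_range',
        show word.toList.length = (word.toList.length - 1) + 1 from by omega,
        List.range'_succ]
      norm_num
    rw [hrange, List.foldl_cons]
    have hstep : countStep prev ((0 : Int), (0 : Int)) 0 = ((0 : Int), (0 : Int)) := by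
      unfold countStep
      rw [hprev 0 (by omega)]
      simp [lastOcc]
    rw [hstep]
    norm_num
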